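-- pv_equiv track=rewrite | github.com/sumithastir/Data-structure | day17-super-stream-engineer.py | solve
-- ===== SOURCE A (Python) =====
-- def solve(A, B, C):
--     N = len(A)
--     # if len(B) > len(A) then return 0.
--     if B > len(A):
--         return 0
--
--     curr_sum = 0
--     for i in range(0, B):
--         curr_sum += A[i]
--     if curr_sum // B <= C:
--         return 1
--
--     for i in range(B, N):
--         curr_sum = curr_sum + A[i] - A[i-B]
--         if curr_sum // B <= C:
--             return 1
--     return 0
-- ===== SOURCE B (Python) =====
-- def solve(A, B, C):
--     N = len(A)
--     if B > N:
--         return 0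
--     P = [0]
--     for x in A:
--         P.append(P[-1] + x)
--     for i in range(N - B + 1):
--         if (P[i + B] - P[i]) // B <= C:
--             return 1
--     return 0
-- ===== Notes on version B (the rewrite author's own statement) =====
-- stated objective: alternative
-- what changed: B precomputes a prefix-sum table and tests each window as a difference of two prefix sums in one uniform loop, instead of A's incrementally maintained sliding sum with a separate initial-window pass.
-- outside the precondition, e.g. on solve([1], -4, 0): A returns 1, B raises IndexError; on solve([], 0, 0): A raises ZeroDivisionError, B raises ZeroDivisionError
import Mathlib
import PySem

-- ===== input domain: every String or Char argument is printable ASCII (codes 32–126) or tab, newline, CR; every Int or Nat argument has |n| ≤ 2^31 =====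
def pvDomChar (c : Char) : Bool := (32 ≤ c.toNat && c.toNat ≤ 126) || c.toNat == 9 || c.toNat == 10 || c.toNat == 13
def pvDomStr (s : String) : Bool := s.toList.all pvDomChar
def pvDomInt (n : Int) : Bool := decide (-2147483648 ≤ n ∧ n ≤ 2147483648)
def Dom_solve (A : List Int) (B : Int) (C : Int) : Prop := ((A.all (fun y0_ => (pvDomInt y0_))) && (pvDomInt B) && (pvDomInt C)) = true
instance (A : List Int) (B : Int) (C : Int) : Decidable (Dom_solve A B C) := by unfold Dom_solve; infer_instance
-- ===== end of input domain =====

-- B replaces A's incrementally maintained sliding window sum by a prefix-sum table,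
-- testing each window as a difference of two prefix sums (objective: alternative).

-- ===== PORT A =====
-- the second for loop of A, with early return (state: curr_sum)
def solveLoop (A : List Int) (B : Int) (C : Int) : List Int → Int → Int
  | [], _ => 0
  | i :: rest, s =>
      let s' := s + PySem.List.pyGetD A i 0 - PySem.List.pyGetD A (i - B) 0
      if PySem.Int.floordiv s' B ≤ C then 1 else solveLoop A B C rest s'

def solve (A : List Int) (B : Int) (C : Int) : Int :=
  let N : Int := (A.length : Int)
  if B > N then 0
  else
    let curr_sum : Int :=
      (PySem.List.pyRange 0 B 1).foldl (fun s i => s + PySem.List.pyGetD A i 0) 0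
    if PySem.Int.floordiv curr_sum B ≤ C then 1
    else solveLoop A B C (PySem.List.pyRange B N 1) curr_sum

-- ===== PORT B =====
-- B's window loop, with early return (P: the prefix-sum table)
def altLoop (P : List Int) (B : Int) (C : Int) : List Int → Int
  | [] => 0
  | i :: rest =>
      if PySem.Int.floordiv (PySem.List.pyGetD P (i + B) 0 - PySem.List.pyGetD P i 0) B ≤ C
      then 1 else altLoop P B C rest

def solve_alt (A : List Int) (B : Int) (C : Int) : Int :=
  let N : Int := (A.length : Int)
  if B > N then 0
  else
    let P : List Int := A.foldl (fun P x => P ++ [PySem.List.pyGetD P (-1) 0 + x]) [0]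
    altLoop P B C (PySem.List.pyRange 0 (N - B + 1) 1)

-- ===== PRECONDITION & SPEC =====
-- Pre_ requires B ≥ 1: for B = 0 the Python A raises ZeroDivisionError; for B < 0 A's
-- behaviour (return 1 iff 0 ≤ C, else IndexError) is an accident of negative-index
-- wraparound outside the task's natural domain (window length must be positive).
def Pre_solve (A : List Int) (B : Int) (C : Int) : Prop := 1 ≤ B
instance (A : List Int) (B : Int) (C : Int) : Decidable (Pre_solve A B C) := by unfold Pre_solve; infer_instance
def pvWitness_solve : List Int × Int × Int := ([1, 5, 2, 4], 2, 3)

def Spec_solve (A : List Int) (B : Int) (C : Int) (out : Int) : Prop := out = solve_alt A B C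
instance (A : List Int) (B : Int) (C : Int) (out : Int) : Decidable (Spec_solve A B C out) := by unfold Spec_solve; infer_instance

-- ===== CLAIM (what is proved, stated in full; the proofs are below) =====
def Claim_equal_solve : Prop := ∀ (A : List Int) (B : Int) (C : Int), Dom_solve A B C → Pre_solve A B C → Spec_solve A B C (solve A B C)

-- ===== LEMMAS AND PROOFS =====

-- window sum starting at index k, length b
def wsum (A : List Int) (b k : ℕ) : Int := ((A.drop k).take b).sum

-- common reference loop: scan windows k, k+1, …, k+m-1
def anyW (A : List Int) (b : ℕ) (B C : Int) : ℕ → ℕ → Int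
  | _, 0 => 0
  | k, m+1 => if PySem.Int.floordiv (wsum A b k) B ≤ C then 1 else anyW A b B C (k+1) m

-- scanSums s l = running partial sums s+l₀, s+l₀+l₁, …
def scanSums (s : Int) : List Int → List Int
  | [] => []
  | x :: xs => (s + x) :: scanSums (s + x) xs

theorem foldl_prefix (l : List Int) : ∀ (acc : List Int) (s : Int),
    l.foldl (fun P x => P ++ [PySem.List.pyGetD P (-1) 0 + x]) (acc ++ [s])
      = (acc ++ [s]) ++ scanSums s l := by
  induction l with
  | nil => intro acc s; simp [scanSums]
  | cons x xs ih =>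
    intro acc s
    have h1 : PySem.List.pyGetD (acc ++ [s]) (-1) 0 = s :=
      PySem.List.pyGetD_neg_one_append_singleton acc s 0
    simp only [List.foldl_cons, h1, scanSums]
    have := ih (acc ++ [s]) (s + x)
    simp only [List.append_assoc] at this ⊢
    simpa using this

theorem scanSums_getD (l : List Int) : ∀ (s : Int) (k : ℕ), k ≤ l.length →
    (s :: scanSums s l).getD k 0 = s + (l.take k).sum := by
  induction l with
  | nil =>
    intro s k hk
    have hk0 : k = 0 := by simpa using hk
    subst hk0; simp [scanSums]
  | cons x xs ih =>
    intro s k hk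
    cases k with
    | zero => simp
    | succ j =>
      have := ih (s + x) j (by simpa using hk)
      simp only [scanSums, List.getD_cons_succ] at this ⊢
      rw [this]; simp [List.take_succ_cons]; ring

-- the prefix table built by solve_alt's fold
theorem prefix_getD (A : List Int) (k : ℕ) (hk : k ≤ A.length) :
    (A.foldl (fun P x => P ++ [PySem.List.pyGetD P (-1) 0 + x]) [0]).getD k 0
      = (A.take k).sum := by
  have h := foldl_prefix A [] 0
  simp only [List.nil_append] at h
  rw [h]
  have := scanSums_getD A 0 k hk
  simpa using this

theorem wsum_take (A : List Int) (b k : ℕ) :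
    (A.take (k + b)).sum - (A.take k).sum = wsum A b k := by
  have : A.take (k + b) = A.take k ++ (A.drop k).take b := by
    rw [List.take_add]
  rw [this, List.sum_append, wsum]; ring

theorem wsum_shift (A : List Int) (b k : ℕ) (hb : 1 ≤ b) (h : k + b < A.length) :
    wsum A b k + A.getD (k + b) 0 - A.getD k 0 = wsum A b (k + 1) := by
  have h1 : (A.take (k + b)).sum - (A.take k).sum = wsum A b k := wsum_take A b k
  have h2 : (A.take (k + 1 + b)).sum - (A.take (k + 1)).sum = wsum A b (k + 1) := wsum_take A b (k + 1)
  have hk : k < A.length := by omega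
  have e1 : A.take (k + 1) = A.take k ++ [A.getD k 0] := by
    rw [List.take_succ]
    simp [List.getElem?_eq_getElem hk, List.getD_eq_getElem?_getD]
  have e2 : A.take (k + 1 + b) = A.take (k + b) ++ [A.getD (k + b) 0] := by
    have : k + 1 + b = (k + b) + 1 := by ring
    rw [this, List.take_succ]
    simp [List.getElem?_eq_getElem h, List.getD_eq_getElem?_getD]
  rw [← h2, e1, e2, List.sum_append, List.sum_append, ← h1]
  simp; ring

-- A's second loop computes anyW starting at window k+1
theorem solveLoop_eq (A : List Int) (B C : Int) (hB : 1 ≤ B) (hBN : B ≤ (A.length : Int)) :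
    ∀ (m k : ℕ) (s : Int), (B + k) + m = (A.length : Int) → s = wsum A B.toNat k →
      solveLoop A B C (PySem.List.pyRange (B + (k : Int)) (A.length : Int) 1) s
        = anyW A B.toNat B C (k + 1) m := by
  intro m
  induction m with
  | zero =>
    intro k s hm hs
    rw [PySem.List.pyRange_one_eq_nil (by omega)]
    simp [solveLoop, anyW]
  | succ m ih =>
    intro k s hm hs
    rw [PySem.List.pyRange_one_cons (by omega)]
    simp only [solveLoop]
    have hidx : (B + (k : Int)) - B = (k : Int) := by ring
    have hkb : k + B.toNat < A.length := by omega
    have hget1 : PySem.List.pyGetD A (B + (k : Int)) 0 = A.getD (k + B.toNat) 0 := by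
      have : B + (k : Int) = ((k + B.toNat : ℕ) : Int) := by omega
      rw [this, PySem.List.pyGetD_natCast]
    have hget2 : PySem.List.pyGetD A ((B + (k : Int)) - B) 0 = A.getD k 0 := by
      rw [hidx, PySem.List.pyGetD_natCast]
    have hs' : s + PySem.List.pyGetD A (B + (k : Int)) 0 - PySem.List.pyGetD A ((B + (k : Int)) - B) 0
        = wsum A B.toNat (k + 1) := by
      rw [hget1, hget2, hs]
      exact wsum_shift A B.toNat k (by omega) hkb
    rw [hs']
    by_cases hc : PySem.Int.floordiv (wsum A B.toNat (k + 1)) B ≤ C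
    · simp [hc, anyW]
    · simp only [hc, if_false]
      have hnext : (B + (k : Int)) + 1 = B + ((k + 1 : ℕ) : Int) := by push_cast; ring
      rw [hnext]
      have := ih (k + 1) (wsum A B.toNat (k + 1)) (by push_cast at hm ⊢; omega) rfl
      rw [this]
      simp [anyW, hc]

-- B's loop computes anyW over the same windows
theorem altLoop_eq (A : List Int) (B C : Int) (hB : 1 ≤ B) (hBN : B ≤ (A.length : Int)) :
    ∀ (m k : ℕ), (k : Int) + m = (A.length : Int) - B + 1 →
      altLoop (A.foldl (fun P x => P ++ [PySem.List.pyGetD P (-1) 0 + x]) [0]) B C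
          (PySem.List.pyRange (k : Int) ((A.length : Int) - B + 1) 1)
        = anyW A B.toNat B C k m := by
  intro m
  induction m with
  | zero =>
    intro k hm
    rw [PySem.List.pyRange_one_eq_nil (by omega)]
    simp [altLoop, anyW]
  | succ m ih =>
    intro k hm
    rw [PySem.List.pyRange_one_cons (by omega)]
    simp only [altLoop]
    set P := A.foldl (fun P x => P ++ [PySem.List.pyGetD P (-1) 0 + x]) [0] with hP
    have hget1 : PySem.List.pyGetD P ((k : Int) + B) 0 = (A.take (k + B.toNat)).sum := by
      have : (k : Int) + B = ((k + B.toNat : ℕ) : Int) := by omega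
      rw [this, PySem.List.pyGetD_natCast, hP, prefix_getD A (k + B.toNat) (by omega)]
    have hget2 : PySem.List.pyGetD P (k : Int) 0 = (A.take k).sum := by
      rw [PySem.List.pyGetD_natCast, hP, prefix_getD A k (by omega)]
    rw [hget1, hget2, wsum_take A B.toNat k]
    by_cases hc : PySem.Int.floordiv (wsum A B.toNat k) B ≤ C
    · simp [hc, anyW]
    · simp only [hc, if_false]
      have hnext : (k : Int) + 1 = ((k + 1 : ℕ) : Int) := by push_cast; ring
      rw [hnext]
      have := ih (k + 1) (by push_cast at hm ⊢; omega)
      rw [this]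
      simp [anyW, hc]

-- A's first loop computes the initial window sum wsum 0
theorem foldl_range_take (A : List Int) : ∀ (b : ℕ), b ≤ A.length →
    (PySem.List.pyRange 0 (b : Int) 1).foldl (fun s i => s + PySem.List.pyGetD A i 0) 0
      = (A.take b).sum := by
  intro b
  induction b with
  | zero => intro _; rw [PySem.List.pyRange_one_eq_nil (by omega)]; simp
  | succ j ihj =>
    intro hj
    have hcast : ((j + 1 : ℕ) : Int) = (j : Int) + 1 := by push_cast; ring
    rw [hcast, PySem.List.pyRange_one_succ_right (by omega)]
    rw [List.foldl_append, ihj (by omega)]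
    simp only [List.foldl_cons, List.foldl_nil]
    have hjlt : j < A.length := by omega
    rw [PySem.List.pyGetD_natCast, List.getD_eq_getElem?_getD,
       List.getElem?_eq_getElem hjlt, List.sum_take_succ _ _ hjlt]
    simp

-- A's first loop computes the initial window sum wsum 0
theorem curr_sum_eq (A : List Int) (B : Int) (hB : 1 ≤ B) (hBN : B ≤ (A.length : Int)) :
    (PySem.List.pyRange 0 B 1).foldl (fun s i => s + PySem.List.pyGetD A i 0) 0
      = wsum A B.toNat 0 := by
  have hBt : ((B.toNat : ℕ) : Int) = B := by omega
  have h2 : ((B.toNat : ℕ) : Int).toNat = B.toNat := by omega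
  rw [← hBt, foldl_range_take A B.toNat (by omega)]
  unfold wsum
  rw [List.drop_zero, h2]

-- ===== VERDICT (by name: the statement is the Claim_ definition above) =====
theorem solve_spec : Claim_equal_solve := by
  unfold Claim_equal_solve Spec_solve Pre_solve
  intro A B C _ hB
  unfold solve solve_alt
  by_cases hgt : B > (A.length : Int)
  · simp [hgt]
  · push_neg at hgt
    simp only [if_neg (by omega : ¬ B > (A.length : Int))]
    rw [curr_sum_eq A B hB hgt]
    have hA := solveLoop_eq A B C hB hgt ((A.length : Int) - B).toNat 0 (wsum A B.toNat 0)
      (by omega) rfl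
    have hBside := altLoop_eq A B C hB hgt (((A.length : Int) - B).toNat + 1) 0 (by omega)
    simp only [Nat.cast_zero] at hBside
    rw [hBside]
    by_cases hc : PySem.Int.floordiv (wsum A B.toNat 0) B ≤ C
    · simp [hc, anyW]
    · simp only [hc, if_false]
      simp only [Nat.cast_zero, add_zero] at hA
      rw [show (B : Int) = B + ((0 : ℕ) : Int) by simp] at hA ⊢
      rw [hA]
      simp [anyW, hc]
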